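-- pv_equiv track=rewrite | github.com/BranislavHaz/dtd-solver | dtd_solver/solver_bottomleft.py | _find_bottomleft_position
-- ===== SOURCE A (Python) =====
-- from typing import List, Optional, Tuple
--
-- def _find_bottomleft_position(
--     occupied: List[Tuple[int, int, int, int]],
--     W: int,
--     H: int,
--     w: int,
--     h: int,
--     kerf: int,
-- ) -> Tuple[Optional[int], Optional[int]]:
--     """
--     Find bottom-left position for a rectangle (w, h) in bin (W, H).
--     Returns (x, y) or (None, None) if doesn't fit.
--     """
--
--     if w > W or h > H:
--         return None, None
--
--     # Try positions from bottom-left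
--     # Generate candidate positions based on existing placements
--     candidates = [(0, 0)]  # Always try bottom-left corner
--
--     for ox, oy, ow, oh in occupied:
--         # Try to place to the right of this placement
--         candidates.append((ox + ow + kerf, oy))
--         # Try to place above this placement
--         candidates.append((ox, oy + oh + kerf))
--
--     # Sort candidates by (y, x) to prioritize bottom, then left
--     candidates.sort(key=lambda p: (p[1], p[0]))
--
--     for x, y in candidates:
--         # Check if part fits at (x, y)
--         if x + w <= W and y + h <= H:
--             # Check no overlap with occupied
--             if not _overlaps(x, y, w, h, occupied, kerf):
--                 return x, y
--
--     return None, None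
--
-- def _overlaps(
--     x: int,
--     y: int,
--     w: int,
--     h: int,
--     occupied: List[Tuple[int, int, int, int]],
--     kerf: int,
-- ) -> bool:
--     """Check if rectangle (x, y, w, h) overlaps with any occupied rectangle."""
--     for ox, oy, ow, oh in occupied:
--         # Rectangles overlap if they don't satisfy any of the four separation conditions
--         if not (
--             x + w + kerf <= ox or      # new is to the left
--             ox + ow + kerf <= x or      # new is to the right
--             y + h + kerf <= oy or      # new is below
--             oy + oh + kerf <= y        # new is above
--         ):
--             return True
--     return False
-- ===== SOURCE B (Python) =====
-- def _overlaps(x, y, w, h, occupied, kerf):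
--     return any(
--         x + w + kerf > ox and ox + ow + kerf > x
--         and y + h + kerf > oy and oy + oh + kerf > y
--         for ox, oy, ow, oh in occupied
--     )
--
--
-- def _find_bottomleft_position(occupied, W, H, w, h, kerf):
--     if w > W or h > H:
--         return None, None
--     candidates = [(0, 0)] + [
--         c
--         for ox, oy, ow, oh in occupied
--         for c in ((ox + ow + kerf, oy), (ox, oy + oh + kerf))
--     ]
--     best = None
--     for x, y in candidates:
--         if x + w <= W and y + h <= H and not _overlaps(x, y, w, h, occupied, kerf):
--             if best is None or (y, x) < (best[1], best[0]):
--                 best = (x, y)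
--     return best if best is not None else (None, None)
-- ===== Notes on version B (the rewrite author's own statement) =====
-- stated objective: alternative
-- what changed: Replaces the sort-candidates-then-return-first-valid decomposition with an unsorted single pass that keeps the valid candidate with the smallest (y, x) key, with the overlap test De-Morganed into an any() of strict inequalities.
import Mathlib
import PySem

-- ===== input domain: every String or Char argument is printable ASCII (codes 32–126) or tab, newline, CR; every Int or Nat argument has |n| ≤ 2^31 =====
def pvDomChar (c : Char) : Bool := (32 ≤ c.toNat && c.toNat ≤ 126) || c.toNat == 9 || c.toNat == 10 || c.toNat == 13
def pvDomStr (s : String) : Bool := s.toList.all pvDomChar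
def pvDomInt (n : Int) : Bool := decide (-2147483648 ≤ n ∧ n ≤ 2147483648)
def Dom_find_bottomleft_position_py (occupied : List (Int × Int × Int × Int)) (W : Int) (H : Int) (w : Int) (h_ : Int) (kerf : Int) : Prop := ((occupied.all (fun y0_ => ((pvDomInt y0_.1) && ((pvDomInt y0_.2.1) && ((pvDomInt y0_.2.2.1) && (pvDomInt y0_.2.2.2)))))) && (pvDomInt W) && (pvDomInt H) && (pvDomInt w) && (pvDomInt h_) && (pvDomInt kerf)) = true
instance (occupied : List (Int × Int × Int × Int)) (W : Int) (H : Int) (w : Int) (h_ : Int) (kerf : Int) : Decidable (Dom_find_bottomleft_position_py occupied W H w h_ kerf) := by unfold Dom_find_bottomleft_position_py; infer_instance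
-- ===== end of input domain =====

-- B replaces A's sort-then-first-valid scan by a single unsorted pass keeping the valid
-- candidate with the smallest (y, x) key (objective: alternative decomposition, same cost).

-- ===== PORT A =====

-- the sort key (p[1], p[0]) of Python, compared lexicographically
def pvKey (p : Int × Int) : Lex (Int × Int) := toLex (p.2, p.1)

-- A's _overlaps: early-return loop over occupied
def pvOverlapsA (x y w h_ kerf : Int) : List (Int × Int × Int × Int) → Bool
  | [] => false
  | o :: rest =>
    if ¬ (x + w + kerf ≤ o.1 ∨ o.1 + o.2.2.1 + kerf ≤ x ∨
          y + h_ + kerf ≤ o.2.1 ∨ o.2.1 + o.2.2.2 + kerf ≤ y) then true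
    else pvOverlapsA x y w h_ kerf rest

-- A's final loop: first candidate that fits and does not overlap
def pvFirstFit (W H w h_ kerf : Int) (occupied : List (Int × Int × Int × Int)) :
    List (Int × Int) → Option Int × Option Int
  | [] => (none, none)
  | p :: rest =>
    if p.1 + w ≤ W ∧ p.2 + h_ ≤ H then
      if ¬ (pvOverlapsA p.1 p.2 w h_ kerf occupied = true) then (some p.1, some p.2)
      else pvFirstFit W H w h_ kerf occupied rest
    else pvFirstFit W H w h_ kerf occupied rest

def find_bottomleft_position_py (occupied : List (Int × Int × Int × Int)) (W : Int) (H : Int) (w : Int) (h_ : Int) (kerf : Int) : Option Int × Option Int :=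
  if w > W ∨ h_ > H then (none, none)
  else
    let candidates := occupied.foldl
      (fun acc o => acc ++ [(o.1 + o.2.2.1 + kerf, o.2.1), (o.1, o.2.1 + o.2.2.2 + kerf)])
      [((0 : Int), (0 : Int))]
    pvFirstFit W H w h_ kerf occupied (PySem.List.sorted candidates pvKey false)

-- ===== PORT B =====

-- B's _overlaps: any() of the De-Morganed strict inequalities
def pvOverlapsB (x y w h_ kerf : Int) (occupied : List (Int × Int × Int × Int)) : Bool :=
  occupied.any (fun o =>
    decide (x + w + kerf > o.1) && decide (o.1 + o.2.2.1 + kerf > x) &&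
    decide (y + h_ + kerf > o.2.1) && decide (o.2.1 + o.2.2.2 + kerf > y))

-- B's loop body: keep the valid candidate with the smallest (y, x) key
def pvStep (W H w h_ kerf : Int) (occupied : List (Int × Int × Int × Int))
    (best : Option (Int × Int)) (p : Int × Int) : Option (Int × Int) :=
  if p.1 + w ≤ W ∧ p.2 + h_ ≤ H ∧ pvOverlapsB p.1 p.2 w h_ kerf occupied = false then
    match best with
    | none => some p
    | some q => if pvKey p < pvKey q then some p else some q
  else best

def find_bottomleft_position_py_alt (occupied : List (Int × Int × Int × Int)) (W : Int) (H : Int) (w : Int) (h_ : Int) (kerf : Int) : Option Int × Option Int :=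
  if w > W ∨ h_ > H then (none, none)
  else
    let candidates := ((0 : Int), (0 : Int)) ::
      occupied.flatMap (fun o => [(o.1 + o.2.2.1 + kerf, o.2.1), (o.1, o.2.1 + o.2.2.2 + kerf)])
    match candidates.foldl (pvStep W H w h_ kerf occupied) none with
    | none => (none, none)
    | some p => (some p.1, some p.2)

-- ===== PRECONDITION & SPEC =====
def Spec_find_bottomleft_position_py (occupied : List (Int × Int × Int × Int)) (W : Int) (H : Int) (w : Int) (h_ : Int) (kerf : Int) (out : Option Int × Option Int) : Prop := out = find_bottomleft_position_py_alt occupied W H w h_ kerf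
instance (occupied : List (Int × Int × Int × Int)) (W : Int) (H : Int) (w : Int) (h_ : Int) (kerf : Int) (out : Option Int × Option Int) : Decidable (Spec_find_bottomleft_position_py occupied W H w h_ kerf out) := by unfold Spec_find_bottomleft_position_py; infer_instance

-- ===== CLAIM (what is proved, stated in full; the proofs are below) =====
def Claim_equal_find_bottomleft_position_py : Prop := ∀ (occupied : List (Int × Int × Int × Int)) (W : Int) (H : Int) (w : Int) (h_ : Int) (kerf : Int), Dom_find_bottomleft_position_py occupied W H w h_ kerf → Spec_find_bottomleft_position_py occupied W H w h_ kerf (find_bottomleft_position_py occupied W H w h_ kerf)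

-- ===== LEMMAS AND PROOFS =====

-- the "valid candidate" predicate both programs test
def pvValid (W H w h_ kerf : Int) (occupied : List (Int × Int × Int × Int)) (p : Int × Int) : Prop :=
  p.1 + w ≤ W ∧ p.2 + h_ ≤ H ∧ pvOverlapsB p.1 p.2 w h_ kerf occupied = false

theorem pvKey_injective : Function.Injective pvKey := by
  intro p q h
  have h' : ((p.2, p.1) : Int × Int) = (q.2, q.1) := congrArg ofLex h
  exact Prod.ext (congrArg Prod.snd h') (congrArg Prod.fst h')

theorem overlaps_eq (w h_ kerf x y : Int) :
    ∀ occ : List (Int × Int × Int × Int),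
      pvOverlapsA x y w h_ kerf occ = pvOverlapsB x y w h_ kerf occ := by
  intro occ
  induction occ with
  | nil => simp [pvOverlapsA, pvOverlapsB]
  | cons o rest ih =>
    simp only [pvOverlapsA, pvOverlapsB, List.any_cons] at *
    by_cases hc : x + w + kerf ≤ o.1 ∨ o.1 + o.2.2.1 + kerf ≤ x ∨
        y + h_ + kerf ≤ o.2.1 ∨ o.2.1 + o.2.2.2 + kerf ≤ y
    · have : (decide (x + w + kerf > o.1) && decide (o.1 + o.2.2.1 + kerf > x) &&
          decide (y + h_ + kerf > o.2.1) && decide (o.2.1 + o.2.2.2 + kerf > y)) = false := by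
        simp only [Bool.and_eq_false_iff, decide_eq_false_iff_not, not_lt]
        omega
      simp [hc, this, ih]
    · have : (decide (x + w + kerf > o.1) && decide (o.1 + o.2.2.1 + kerf > x) &&
          decide (y + h_ + kerf > o.2.1) && decide (o.2.1 + o.2.2.2 + kerf > y)) = true := by
        simp only [Bool.and_eq_true, decide_eq_true_eq, gt_iff_lt]
        omega
      simp [hc, this]

-- A's scan on a key-sorted list: returns (none,none) with nothing valid, or the valid
-- element with the least key
theorem firstFit_spec (W H w h_ kerf : Int) (occ : List (Int × Int × Int × Int)) :
    ∀ s : List (Int × Int), s.Pairwise (fun a b => pvKey a ≤ pvKey b) →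
      (pvFirstFit W H w h_ kerf occ s = (none, none) ∧ ∀ p ∈ s, ¬ pvValid W H w h_ kerf occ p) ∨
      (∃ m, pvFirstFit W H w h_ kerf occ s = (some m.1, some m.2) ∧ pvValid W H w h_ kerf occ m ∧
        m ∈ s ∧ ∀ p ∈ s, pvValid W H w h_ kerf occ p → pvKey m ≤ pvKey p) := by
  intro s hs
  induction s with
  | nil => left; simp [pvFirstFit]
  | cons a t ih =>
    have hle : ∀ b ∈ t, pvKey a ≤ pvKey b := (List.pairwise_cons.mp hs).1
    have ht := ih (List.pairwise_cons.mp hs).2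
    by_cases hv : pvValid W H w h_ kerf occ a
    · right
      refine ⟨a, ?_, hv, List.mem_cons_self, ?_⟩
      · obtain ⟨h1, h2, h3⟩ := hv
        simp [pvFirstFit, h1, h2, overlaps_eq, h3]
      · intro p hp _
        rcases List.mem_cons.mp hp with rfl | hp'
        · exact le_refl _
        · exact hle p hp'
    · have hrec : pvFirstFit W H w h_ kerf occ (a :: t) = pvFirstFit W H w h_ kerf occ t := by
        simp only [pvValid] at hv
        rw [← overlaps_eq] at hv
        by_cases h1 : a.1 + w ≤ W ∧ a.2 + h_ ≤ H
        · have h3 : pvOverlapsA a.1 a.2 w h_ kerf occ = true := by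
            rcases Bool.eq_false_or_eq_true (pvOverlapsA a.1 a.2 w h_ kerf occ) with hf | ht'
            · exact hf
            · exact absurd ⟨h1.1, h1.2, ht'⟩ hv
          simp [pvFirstFit, h1.1, h1.2, h3]
        · simp [pvFirstFit, h1]
      rcases ht with ⟨he, hall⟩ | ⟨m, he, hvm, hm, hmin⟩
      · left
        refine ⟨hrec.trans he, ?_⟩
        intro p hp
        rcases List.mem_cons.mp hp with rfl | hp'
        · exact hv
        · exact hall p hp'
      · right
        refine ⟨m, hrec.trans he, hvm, List.mem_cons_of_mem _ hm, ?_⟩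
        intro p hp hvp
        rcases List.mem_cons.mp hp with rfl | hp'
        · exact absurd hvp hv
        · exact hmin p hp' hvp

-- case analysis of one B-loop step
theorem step_cases (W H w h_ kerf : Int) (occ : List (Int × Int × Int × Int))
    (b : Option (Int × Int)) (x : Int × Int) :
    (¬ pvValid W H w h_ kerf occ x ∧ pvStep W H w h_ kerf occ b x = b) ∨
    (pvValid W H w h_ kerf occ x ∧
      ((b = none ∧ pvStep W H w h_ kerf occ b x = some x) ∨
       (∃ q, b = some q ∧
         ((pvKey x < pvKey q ∧ pvStep W H w h_ kerf occ b x = some x) ∨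
          (¬ pvKey x < pvKey q ∧ pvStep W H w h_ kerf occ b x = some q))))) := by
  by_cases hv : pvValid W H w h_ kerf occ x
  · have hv' := hv
    unfold pvValid at hv'
    right
    refine ⟨hv, ?_⟩
    cases b with
    | none => left; exact ⟨rfl, by unfold pvStep; rw [if_pos hv']⟩
    | some q =>
      right
      refine ⟨q, rfl, ?_⟩
      by_cases hlt : pvKey x < pvKey q
      · left; exact ⟨hlt, by unfold pvStep; rw [if_pos hv']; simp [hlt]⟩
      · right; exact ⟨hlt, by unfold pvStep; rw [if_pos hv']; simp [hlt]⟩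
  · have hv' := hv
    unfold pvValid at hv'
    left; exact ⟨hv, by unfold pvStep; rw [if_neg hv']⟩

theorem fold_some (W H w h_ kerf : Int) (occ : List (Int × Int × Int × Int)) :
    ∀ (l : List (Int × Int)) (q : Int × Int),
      ∃ m, l.foldl (pvStep W H w h_ kerf occ) (some q) = some m := by
  intro l
  induction l with
  | nil => intro q; exact ⟨q, rfl⟩
  | cons x t ih =>
    intro q
    simp only [List.foldl_cons]
    rcases step_cases W H w h_ kerf occ (some q) x with ⟨_, he⟩ | ⟨_, ⟨hn, _⟩ | ⟨q', _, ⟨_, he⟩ | ⟨_, he⟩⟩⟩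
    · rw [he]; exact ih q
    · exact absurd hn (by simp)
    · rw [he]; exact ih x
    · rw [he]; exact ih q'

-- invariant of B's fold: the result is a valid element of the list (or the initial best),
-- minimal in key among the initial best and all valid elements
theorem fold_inv (W H w h_ kerf : Int) (occ : List (Int × Int × Int × Int)) :
    ∀ (l : List (Int × Int)) (b : Option (Int × Int)) (m : Int × Int),
      l.foldl (pvStep W H w h_ kerf occ) b = some m →
      (b = some m ∨ (pvValid W H w h_ kerf occ m ∧ m ∈ l)) ∧
      (∀ q, b = some q → pvKey m ≤ pvKey q) ∧
      (∀ p ∈ l, pvValid W H w h_ kerf occ p → pvKey m ≤ pvKey p) := by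
  intro l
  induction l with
  | nil =>
    intro b m h
    simp only [List.foldl_nil] at h
    refine ⟨Or.inl h, fun q hq => ?_, fun p hp => absurd hp List.not_mem_nil⟩
    rw [h] at hq; injection hq with h'; rw [h']
  | cons x t ih =>
    intro b m h
    simp only [List.foldl_cons] at h
    rcases step_cases W H w h_ kerf occ b x with ⟨hnv, he⟩ | ⟨hv, hcase⟩
    · rw [he] at h
      obtain ⟨i1, i2, i3⟩ := ih b m h
      refine ⟨?_, i2, ?_⟩
      · rcases i1 with h' | ⟨hvm, hm⟩
        · exact Or.inl h'
        · exact Or.inr ⟨hvm, List.mem_cons_of_mem _ hm⟩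
      · intro p hp hvp
        rcases List.mem_cons.mp hp with rfl | hp'
        · exact absurd hvp hnv
        · exact i3 p hp' hvp
    · rcases hcase with ⟨hbn, he⟩ | ⟨q, hbq, ⟨hlt, he⟩ | ⟨hge, he⟩⟩
      · -- b = none, b' = some x
        rw [he] at h
        obtain ⟨i1, i2, i3⟩ := ih (some x) m h
        have hmx : pvKey m ≤ pvKey x := i2 x rfl
        refine ⟨?_, fun q hq => by rw [hbn] at hq; exact absurd hq (by simp), ?_⟩
        · rcases i1 with h' | ⟨hvm, hm⟩
          · injection h' with h''; exact Or.inr ⟨h'' ▸ hv, h'' ▸ List.mem_cons_self⟩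
          · exact Or.inr ⟨hvm, List.mem_cons_of_mem _ hm⟩
        · intro p hp hvp
          rcases List.mem_cons.mp hp with rfl | hp'
          · exact hmx
          · exact i3 p hp' hvp
      · -- b = some q, key x < key q, b' = some x
        rw [he] at h
        obtain ⟨i1, i2, i3⟩ := ih (some x) m h
        have hmx : pvKey m ≤ pvKey x := i2 x rfl
        refine ⟨?_, ?_, ?_⟩
        · rcases i1 with h' | ⟨hvm, hm⟩
          · injection h' with h''; exact Or.inr ⟨h'' ▸ hv, h'' ▸ List.mem_cons_self⟩
          · exact Or.inr ⟨hvm, List.mem_cons_of_mem _ hm⟩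
        · intro q' hq'
          rw [hbq] at hq'; injection hq' with h''; rw [← h'']
          exact le_of_lt (lt_of_le_of_lt hmx hlt)
        · intro p hp hvp
          rcases List.mem_cons.mp hp with rfl | hp'
          · exact hmx
          · exact i3 p hp' hvp
      · -- b = some q, ¬(key x < key q), b' = some q = b
        rw [he] at h
        obtain ⟨i1, i2, i3⟩ := ih (some q) m h
        have hmq : pvKey m ≤ pvKey q := i2 q rfl
        refine ⟨?_, ?_, ?_⟩
        · rcases i1 with h' | ⟨hvm, hm⟩
          · exact Or.inl (hbq.trans h')
          · exact Or.inr ⟨hvm, List.mem_cons_of_mem _ hm⟩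
        · intro q' hq'
          rw [hbq] at hq'; injection hq' with h''; rw [← h'']; exact hmq
        · intro p hp hvp
          rcases List.mem_cons.mp hp with rfl | hp'
          · exact le_trans hmq (le_of_not_gt hge)
          · exact i3 p hp' hvp

theorem fold_none (W H w h_ kerf : Int) (occ : List (Int × Int × Int × Int)) :
    ∀ l : List (Int × Int), l.foldl (pvStep W H w h_ kerf occ) none = none →
      ∀ p ∈ l, ¬ pvValid W H w h_ kerf occ p := by
  intro l
  induction l with
  | nil => intro _ p hp; exact absurd hp List.not_mem_nil
  | cons x t ih =>
    intro hl p hp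
    simp only [List.foldl_cons] at hl
    rcases step_cases W H w h_ kerf occ none x with ⟨hnv, he⟩ | ⟨_, ⟨_, he⟩ | ⟨q, hq, _⟩⟩
    · rw [he] at hl
      rcases List.mem_cons.mp hp with rfl | hp'
      · exact hnv
      · exact ih hl p hp'
    · rw [he] at hl
      obtain ⟨m'', hm''⟩ := fold_some W H w h_ kerf occ t x
      rw [hm''] at hl
      exact absurd hl (by simp)
    · exact absurd hq (by simp)

theorem fold_all_invalid (W H w h_ kerf : Int) (occ : List (Int × Int × Int × Int)) :
    ∀ l : List (Int × Int), (∀ p ∈ l, ¬ pvValid W H w h_ kerf occ p) →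
      l.foldl (pvStep W H w h_ kerf occ) none = none := by
  intro l
  induction l with
  | nil => intro _; rfl
  | cons x t ih =>
    intro hall
    simp only [List.foldl_cons]
    have hx : pvStep W H w h_ kerf occ none x = none := by
      unfold pvStep
      split
      · exact absurd (by assumption) (hall x List.mem_cons_self)
      · rfl
    rw [hx]
    exact ih (fun p hp => hall p (List.mem_cons_of_mem _ hp))

-- the two candidate-list constructions build the same list
theorem cands_eq (f g : (Int × Int × Int × Int) → Int × Int) :
    ∀ (l : List (Int × Int × Int × Int)) (init : List (Int × Int)),
      l.foldl (fun acc o => acc ++ [f o, g o]) init = init ++ l.flatMap (fun o => [f o, g o]) := by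
  intro l
  induction l with
  | nil => intro init; simp
  | cons o t ih => intro init; simp [ih, List.flatMap_cons]

-- ===== VERDICT (by name: the statement is the Claim_ definition above) =====
theorem find_bottomleft_position_py_spec : Claim_equal_find_bottomleft_position_py := by
  intro occupied W H w h_ kerf _
  unfold Spec_find_bottomleft_position_py
  unfold find_bottomleft_position_py find_bottomleft_position_py_alt
  by_cases hg : w > W ∨ h_ > H
  · simp [hg]
  · simp only [hg, if_false]
    set cands : List (Int × Int) := ((0 : Int), (0 : Int)) ::
      occupied.flatMap (fun o => [(o.1 + o.2.2.1 + kerf, o.2.1), (o.1, o.2.1 + o.2.2.2 + kerf)]) with hcands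
    have hceq : occupied.foldl
        (fun acc o => acc ++ [(o.1 + o.2.2.1 + kerf, o.2.1), (o.1, o.2.1 + o.2.2.2 + kerf)])
        [((0 : Int), (0 : Int))] = cands := by
      rw [cands_eq (fun o => (o.1 + o.2.2.1 + kerf, o.2.1)) (fun o => (o.1, o.2.1 + o.2.2.2 + kerf)) occupied]
      rfl
    rw [hceq]
    set s := PySem.List.sorted cands pvKey false with hsdef
    have hperm : s.Perm cands := PySem.List.sorted_perm cands pvKey false
    have hpw : s.Pairwise (fun a b => pvKey a ≤ pvKey b) := PySem.List.sorted_pairwise cands pvKey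
    have hmem : ∀ p : Int × Int, p ∈ s ↔ p ∈ cands := fun p => hperm.mem_iff
    rcases firstFit_spec W H w h_ kerf occupied s hpw with ⟨he, hall⟩ | ⟨m, he, hvm, hm, hmin⟩
    · rw [he]
      have : cands.foldl (pvStep W H w h_ kerf occupied) none = none :=
        fold_all_invalid W H w h_ kerf occupied cands
          (fun p hp => hall p ((hmem p).mpr hp))
      rw [this]
    · rw [he]
      rcases hfold : cands.foldl (pvStep W H w h_ kerf occupied) none with _ | m'
      · exact absurd hvm (fold_none W H w h_ kerf occupied cands hfold m ((hmem m).mp hm))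
      · obtain ⟨i1, _, i3⟩ := fold_inv W H w h_ kerf occupied cands none m' hfold
        rcases i1 with hb | ⟨hvm', hm'⟩
        · exact absurd hb (by simp)
        · have h1 : pvKey m ≤ pvKey m' := hmin m' ((hmem m').mpr hm') hvm'
          have h2 : pvKey m' ≤ pvKey m := i3 m ((hmem m).mp hm) hvm
          have : m = m' := pvKey_injective (le_antisymm h1 h2)
          rw [this]
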